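-- pv_equiv track=rewrite | github.com/lehancode/uba_computacion | parciales/Python - ComC-20241126/solucion.py | longitud_mas_grande
-- ===== SOURCE A (Python) =====
-- def longitud_mas_grande(m: list[list[int]]) -> int:  #[[1,1],[0,1,1,1,1,0]]
--   longitud: int = 0
--   longitud_actual: int = 0
--
--   for s in m:
--     longitud_actual = 0
--     for i in range(len(s)):
--       if s[i] == 1:
--         longitud_actual += 1
--       else:
--         if longitud_actual > longitud:
--           longitud = longitud_actual
--         longitud_actual = 0
--     if longitud_actual > longitud:
--       longitud = longitud_actual
--
--   return longitud
-- ===== SOURCE B (Python) =====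
-- from itertools import groupby
--
-- def longitud_mas_grande(m: list[list[int]]) -> int:
--     best = 0
--     for row in m:
--         for key, group in groupby(row):
--             if key == 1:
--                 best = max(best, sum(1 for _ in group))
--     return best
-- ===== Notes on version B (the rewrite author's own statement) =====
-- stated objective: idiomatic
-- what changed: B splits each row into maximal runs with itertools.groupby and takes a running max of the lengths of the runs of 1s, instead of A's reset-on-mismatch counter with the duplicated end-of-row flush.
import Mathlib
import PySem

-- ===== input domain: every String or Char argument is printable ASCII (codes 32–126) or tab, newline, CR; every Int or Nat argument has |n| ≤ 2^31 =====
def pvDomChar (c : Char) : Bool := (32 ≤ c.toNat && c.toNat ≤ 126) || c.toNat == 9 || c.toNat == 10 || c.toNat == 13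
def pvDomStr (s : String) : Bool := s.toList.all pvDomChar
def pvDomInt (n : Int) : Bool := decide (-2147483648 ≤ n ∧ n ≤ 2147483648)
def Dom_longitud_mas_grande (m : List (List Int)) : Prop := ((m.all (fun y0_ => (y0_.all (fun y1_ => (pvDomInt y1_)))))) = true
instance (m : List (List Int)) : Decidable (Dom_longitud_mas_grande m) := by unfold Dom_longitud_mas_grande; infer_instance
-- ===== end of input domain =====

-- B replaces A's reset-on-mismatch counter (with its duplicated end-of-row flush) by
-- splitting each row into maximal runs (groupby) and taking the max length of the runs of 1s.

-- ===== PORT A =====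
-- state = (longitud, longitud_actual)
def longitud_mas_grande (m : List (List Int)) : Int :=
  (m.foldl (fun (longitud : Int) s =>
    let p := (PySem.List.pyRange 0 (s.length : Int) 1).foldl
      (fun (q : Int × Int) i =>
        if PySem.List.pyGetD s i 0 = 1 then (q.1, q.2 + 1)
        else (if q.2 > q.1 then (q.2, 0) else (q.1, 0)))
      (longitud, 0)
    if p.2 > p.1 then p.2 else p.1) 0)

-- ===== PORT B =====
-- itertools.groupby: maximal runs of equal values, left to right, as (key, length) pairs.
def pvRuns (xs : List Int) : List (Int × Int) :=
  match xs with
  | [] => []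
  | x :: t =>
    match pvRuns t with
    | [] => [(x, 1)]
    | (k, n) :: r => if x = k then (k, n + 1) :: r else (x, 1) :: (k, n) :: r

def longitud_mas_grande_alt (m : List (List Int)) : Int :=
  m.foldl (fun best row =>
    (pvRuns row).foldl (fun b kg => if kg.1 = 1 then max b kg.2 else b) best) 0

-- ===== PRECONDITION & SPEC =====
def Spec_longitud_mas_grande (m : List (List Int)) (out : Int) : Prop := out = longitud_mas_grande_alt m
instance (m : List (List Int)) (out : Int) : Decidable (Spec_longitud_mas_grande m out) := by unfold Spec_longitud_mas_grande; infer_instance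

-- ===== CLAIM (what is proved, stated in full; the proofs are below) =====
def Claim_equal_longitud_mas_grande : Prop := ∀ (m : List (List Int)), Dom_longitud_mas_grande m → Spec_longitud_mas_grande m (longitud_mas_grande m)

-- ===== LEMMAS AND PROOFS =====

-- A's inner-loop step over elements (after the pyRange/pyGetD bridge), and its end-of-row flush.
def pvStep (q : Int × Int) (x : Int) : Int × Int :=
  if x = 1 then (q.1, q.2 + 1) else (if q.2 > q.1 then (q.2, 0) else (q.1, 0))

def pvFinish (p : Int × Int) : Int := if p.2 > p.1 then p.2 else p.1

-- lengths of the runs of 1s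
def pvLens (rs : List (Int × Int)) : List Int :=
  rs.filterMap (fun kg => if kg.1 = 1 then some kg.2 else none)

-- lengths of the runs of 1s of xs, with a pending count c merged into a leading 1-run
-- (or recorded on its own when xs does not start with 1)
def pvLensFrom (c : Int) (xs : List Int) : List Int :=
  match pvRuns xs with
  | [] => [c]
  | (k, n) :: r => if k = 1 then (c + n) :: pvLens r else c :: pvLens ((k, n) :: r)

theorem pvLens_cons_ne (k n : Int) (r : List (Int × Int)) (hk : ¬ k = 1) :
    pvLens ((k, n) :: r) = pvLens r := by
  simp [pvLens, hk]

theorem pvLens_cons_one (n : Int) (r : List (Int × Int)) :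
    pvLens ((1, n) :: r) = n :: pvLens r := by
  simp [pvLens]

theorem pvRuns_key (x : Int) (t : List Int) (k n : Int) (r : List (Int × Int))
    (h : pvRuns (x :: t) = (k, n) :: r) : k = x := by
  rcases hrt : pvRuns t with _ | ⟨⟨k', n'⟩, r'⟩ <;> simp only [pvRuns, hrt] at h
  · simp at h; omega
  · by_cases h2 : x = k' <;> simp [h2] at h <;> omega

theorem pvFoldB_eq_lens (rs : List (Int × Int)) (b : Int) :
    rs.foldl (fun b kg => if kg.1 = 1 then max b kg.2 else b) b = (pvLens rs).foldl max b := by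
  induction rs generalizing b with
  | nil => rfl
  | cons kg t ih =>
    obtain ⟨k, n⟩ := kg
    by_cases h : k = 1 <;> simp [pvLens, h, ih, List.foldl_cons]

theorem pvLensFrom_one (c : Int) (t : List Int) :
    pvLensFrom c (1 :: t) = pvLensFrom (c + 1) t := by
  unfold pvLensFrom
  rcases hrt : pvRuns t with _ | ⟨⟨k, n⟩, r⟩ <;> simp only [pvRuns, hrt]
  · simp [pvLens]
  · by_cases hk : (1 : Int) = k
    · subst hk; simp; ring_nf
    · have hk' : ¬ (k = 1) := fun h => hk h.symm
      simp [hk, hk', pvLens_cons_ne k n r hk']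

theorem pvLens_runs_cons_ne (x : Int) (t : List Int) (hx : ¬ x = 1) :
    pvLens (pvRuns (x :: t)) = pvLens (pvRuns t) := by
  rcases hrt : pvRuns t with _ | ⟨⟨k, n⟩, r⟩ <;> simp only [pvRuns, hrt]
  · simp [pvLens, hx]
  · by_cases h2 : x = k
    · subst h2; simp [pvLens_cons_ne x n r hx, pvLens_cons_ne x (n+1) r hx]
    · simp [h2, pvLens_cons_ne x 1 _ hx]

theorem pvLensFrom_cons_ne (c x : Int) (t : List Int) (hx : ¬ x = 1) :
    pvLensFrom c (x :: t) = c :: pvLens (pvRuns (x :: t)) := by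
  unfold pvLensFrom
  rcases hr : pvRuns (x :: t) with _ | ⟨⟨k, n⟩, r⟩
  · -- impossible: pvRuns of a cons is nonempty; but the branch is consistent anyway
    exfalso
    rcases hrt : pvRuns t with _ | ⟨⟨k', n'⟩, r'⟩ <;> simp only [pvRuns, hrt] at hr
    · simp at hr
    · by_cases h2 : x = k' <;> simp [h2] at hr
  · have hk : ¬ k = 1 := by rw [pvRuns_key x t k n r hr]; exact hx
    simp [hk]

theorem pvFold_lensFrom_zero (t : List Int) (M : Int) (hM : 0 ≤ M) :
    (pvLensFrom 0 t).foldl max M = (pvLens (pvRuns t)).foldl max M := by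
  unfold pvLensFrom
  rcases hrt : pvRuns t with _ | ⟨⟨k, n⟩, r⟩
  · simp [pvLens]; omega
  · by_cases hk : k = 1
    · subst hk; simp [pvLens_cons_one]
    · simp [hk, List.foldl_cons]
      rw [show max M 0 = M from by omega]

theorem pvInner_eq (xs : List Int) (L c : Int) (hc : 0 ≤ c) :
    pvFinish (xs.foldl pvStep (L, c)) = (pvLensFrom c xs).foldl max L := by
  induction xs generalizing L c with
  | nil =>
    simp only [List.foldl_nil, pvLensFrom, pvRuns, pvFinish, List.foldl_cons, List.foldl_nil]
    split <;> omega
  | cons x t ih =>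
    by_cases hx : x = 1
    · subst hx
      simp only [List.foldl_cons]
      rw [show pvStep (L, c) 1 = (L, c + 1) from by simp [pvStep],
        ih L (c + 1) (by omega), pvLensFrom_one]
    · have hstep : pvStep (L, c) x = (max L c, 0) := by
        simp only [pvStep, if_neg hx]; split <;> simp <;> omega
      simp only [List.foldl_cons]
      rw [hstep, ih (max L c) 0 le_rfl, pvLensFrom_cons_ne c x t hx, List.foldl_cons]
      rw [pvFold_lensFrom_zero t (max L c) (by omega), pvLens_runs_cons_ne x t hx]

theorem pvRow_ge (rs : List (Int × Int)) (L : Int) :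
    L ≤ rs.foldl (fun b kg => if kg.1 = 1 then max b kg.2 else b) L := by
  induction rs generalizing L with
  | nil => exact le_rfl
  | cons kg t ih =>
    simp only [List.foldl_cons]
    refine le_trans ?_ (ih _)
    split <;> omega

theorem pvRow_eq (s : List Int) (L : Int) (hL : 0 ≤ L) :
    pvFinish (s.foldl pvStep (L, 0))
      = (pvRuns s).foldl (fun b kg => if kg.1 = 1 then max b kg.2 else b) L := by
  rw [pvFoldB_eq_lens, pvInner_eq s L 0 le_rfl, pvFold_lensFrom_zero s L hL]

theorem pvOuter_eq (m : List (List Int)) (L : Int) (hL : 0 ≤ L) :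
    m.foldl (fun (longitud : Int) s => pvFinish (s.foldl pvStep (longitud, 0))) L
    = m.foldl (fun best row =>
        (pvRuns row).foldl (fun b kg => if kg.1 = 1 then max b kg.2 else b) best) L := by
  induction m generalizing L with
  | nil => rfl
  | cons s t ih =>
    simp only [List.foldl_cons]
    rw [pvRow_eq s L hL]
    exact ih _ (le_trans hL (pvRow_ge _ _))

-- ===== VERDICT (by name: the statement is the Claim_ definition above) =====
theorem longitud_mas_grande_spec : Claim_equal_longitud_mas_grande := by
  intro m _
  unfold Spec_longitud_mas_grande longitud_mas_grande longitud_mas_grande_alt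
  have hbridge : ∀ (s : List Int) (L : Int),
      (let p := (PySem.List.pyRange 0 (s.length : Int) 1).foldl
        (fun (q : Int × Int) i =>
          if PySem.List.pyGetD s i 0 = 1 then (q.1, q.2 + 1)
          else (if q.2 > q.1 then (q.2, 0) else (q.1, 0)))
        (L, 0);
       if p.2 > p.1 then p.2 else p.1)
      = pvFinish (s.foldl pvStep (L, 0)) := by
    intro s L
    rw [show (fun (q : Int × Int) i =>
          if PySem.List.pyGetD s i 0 = 1 then (q.1, q.2 + 1)
          else (if q.2 > q.1 then (q.2, 0) else (q.1, 0)))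
        = (fun (q : Int × Int) i => pvStep q (PySem.List.pyGetD s i 0)) from rfl]
    rw [PySem.List.foldl_pyRange_zero_pyGetD' s 0 pvStep ((L : Int), (0 : Int))]
    rfl
  simp only [hbridge]
  exact pvOuter_eq m 0 le_rfl
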